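-- pv_equiv track=rewrite | github.com/bensonlew/rnawl | src/mbio/api/database/dna_gmap/qtl.py | sort_chr
-- ===== SOURCE A (Python) =====
-- def sort_chr(chr_lists):
--     """
--     对chr/sca进行排序
--     """
--     chr_list, sca_list, other_list, final_list = [], [], [], []
--     for i in chr_lists:   # 对染色体排序
--         if i.startswith("chr"):
--             num = i.strip().split("chr")[-1]
--             chr_list.append(int(num))
--         elif i.startswith("sca"):
--             num = i.strip().split("sca")[-1]
--             sca_list.append(int(num))
--         else:
--             other_list.append(i)
--     chr_list.sort()
--     sca_list.sort()
--     for i in chr_list: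
--         final_list.append("chr" + str(i))
--     for i in sca_list:
--         final_list.append("sca" + str(i))
--     for i in other_list:
--         final_list.append(i)
--     return final_list
-- ===== SOURCE B (Python) =====
-- def sort_chr(chr_lists):
--     decorated = []
--     for i in chr_lists:
--         if i.startswith("chr"):
--             n = int(i.strip().split("chr")[-1])
--             decorated.append(((0, n), "chr" + str(n)))
--         elif i.startswith("sca"):
--             n = int(i.strip().split("sca")[-1])
--             decorated.append(((1, n), "sca" + str(n)))
--         else:
--             decorated.append(((2, 0), i))
--     decorated.sort(key=lambda t: t[0])
--     return [s for _, s in decorated]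
-- ===== Notes on version B (the rewrite author's own statement) =====
-- stated objective: alternative
-- what changed: Replaces the three-bucket partition with two separate integer sorts and three rebuild loops by a single decorate-sort-undecorate pass: one stable sort of (bucket, number) keyed tuples whose payload is already the normalized label.
import Mathlib
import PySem

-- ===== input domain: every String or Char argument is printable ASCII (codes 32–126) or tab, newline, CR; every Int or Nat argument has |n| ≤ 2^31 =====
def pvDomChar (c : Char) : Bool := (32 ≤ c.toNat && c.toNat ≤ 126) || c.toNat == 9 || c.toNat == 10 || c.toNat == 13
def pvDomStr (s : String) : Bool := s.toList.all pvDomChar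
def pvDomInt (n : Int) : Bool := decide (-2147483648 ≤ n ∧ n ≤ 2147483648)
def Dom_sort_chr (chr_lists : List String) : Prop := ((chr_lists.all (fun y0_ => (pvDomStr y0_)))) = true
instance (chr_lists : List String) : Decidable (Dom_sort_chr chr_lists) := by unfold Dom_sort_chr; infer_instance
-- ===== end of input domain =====

-- B replaces A's three-bucket partition + two integer sorts + three rebuild loops by one
-- decorate / stable-sort / undecorate pass (objective: alternative, same cost).

-- ===== PORT A =====
-- int(i.strip().split(tag)[-1]) — this expression occurs verbatim in both Pythons
def pvIntSuffix (i : String) (tag : String) : Option Int :=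
  ((PySem.Str.split? (PySem.Str.strip i) tag).bind
    (fun ps => PySem.List.pyGet? ps (-1))).bind PySem.Int.ofStr?

-- loop body of A's classifying for-loop (none = the ValueError path)
def pvStepA (acc : Option (List Int × List Int × List String)) (i : String) :
    Option (List Int × List Int × List String) :=
  acc.bind (fun cso =>
    if PySem.Str.startswith i "chr" then
      (pvIntSuffix i "chr").map (fun n => (cso.1 ++ [n], cso.2.1, cso.2.2))
    else if PySem.Str.startswith i "sca" then
      (pvIntSuffix i "sca").map (fun n => (cso.1, cso.2.1 ++ [n], cso.2.2))
    else some (cso.1, cso.2.1, cso.2.2 ++ [i]))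

def sort_chr (chr_lists : List String) : List String :=
  match chr_lists.foldl pvStepA (some ([], [], [])) with
  | none => []   -- unreachable under Pre_sort_chr (Python raises ValueError)
  | some (c, s, o) =>
    let f1 := (PySem.List.sorted c (fun x => x) false).foldl
                (fun acc n => acc ++ ["chr" ++ PySem.Int.toStr n]) []
    let f2 := (PySem.List.sorted s (fun x => x) false).foldl
                (fun acc n => acc ++ ["sca" ++ PySem.Int.toStr n]) f1
    o.foldl (fun acc i => acc ++ [i]) f2

-- ===== PORT B =====
-- loop body of B's decorating for-loop (none = the ValueError path)
def pvStepB (acc : Option (List ((Int × Int) × String))) (i : String) :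
    Option (List ((Int × Int) × String)) :=
  acc.bind (fun d =>
    if PySem.Str.startswith i "chr" then
      (pvIntSuffix i "chr").map
        (fun n => d ++ [(((0 : Int), n), "chr" ++ PySem.Int.toStr n)])
    else if PySem.Str.startswith i "sca" then
      (pvIntSuffix i "sca").map
        (fun n => d ++ [(((1 : Int), n), "sca" ++ PySem.Int.toStr n)])
    else some (d ++ [(((2 : Int), (0 : Int)), i)]))

def sort_chr_alt (chr_lists : List String) : List String :=
  match chr_lists.foldl pvStepB (some []) with
  | none => []   -- unreachable under Pre_sort_chr (Python raises ValueError)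
  | some d =>
    (PySem.List.sorted2 d (fun t => t.1.1) (fun t => t.1.2) false).map (fun t => t.2)

-- ===== PRECONDITION & SPEC =====
-- Pre_ excludes exactly the inputs on which Python A raises ValueError: an item starting
-- with "chr"/"sca" whose suffix after strip/split is not a valid int literal.
def Pre_sort_chr (chr_lists : List String) : Prop :=
  ∀ i ∈ chr_lists,
    (PySem.Str.startswith i "chr" = true → (pvIntSuffix i "chr").isSome = true) ∧
    (PySem.Str.startswith i "chr" = false → PySem.Str.startswith i "sca" = true →
      (pvIntSuffix i "sca").isSome = true)
instance (chr_lists : List String) : Decidable (Pre_sort_chr chr_lists) := by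
  unfold Pre_sort_chr; infer_instance
def pvWitness_sort_chr : List String := ["chr10", "sca2", "UnMapped", "chr2", "sca2"]

def Spec_sort_chr (chr_lists : List String) (out : List String) : Prop := out = sort_chr_alt chr_lists
instance (chr_lists : List String) (out : List String) : Decidable (Spec_sort_chr chr_lists out) := by unfold Spec_sort_chr; infer_instance

-- ===== CLAIM (what is proved, stated in full; the proofs are below) =====
def Claim_equal_sort_chr : Prop := ∀ (chr_lists : List String), Dom_sort_chr chr_lists → Pre_sort_chr chr_lists → Spec_sort_chr chr_lists (sort_chr chr_lists)

-- ===== LEMMAS AND PROOFS =====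

-- the integer comparison behind list.sort() and the tuple comparison behind sort(key=t[0])
def pvLtI (a b : Int) : Bool := decide (a < b)
def pvLt2 (a b : (Int × Int) × String) : Bool :=
  decide (a.1.1 < b.1.1) || (!decide (b.1.1 < a.1.1) && decide (a.1.2 < b.1.2))

def pvIsort (l : List Int) : List Int :=
  l.foldl (fun acc x => PySem.List.insertBy pvLtI x acc) []

-- the decorations of the three buckets
def pvDec0 (n : Int) : (Int × Int) × String := ((0, n), "chr" ++ PySem.Int.toStr n)
def pvDec1 (n : Int) : (Int × Int) × String := ((1, n), "sca" ++ PySem.Int.toStr n)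
def pvDec2 (i : String) : (Int × Int) × String := ((2, 0), i)

def pvNum (i : String) (tag : String) : Int := (pvIntSuffix i tag).getD 0

-- the three buckets of a fully classified input, and its decorated form, in input order
def pvClsC : List String → List Int
  | [] => []
  | i :: xs =>
    if PySem.Str.startswith i "chr" then pvNum i "chr" :: pvClsC xs else pvClsC xs
def pvClsS : List String → List Int
  | [] => []
  | i :: xs =>
    if PySem.Str.startswith i "chr" then pvClsS xs
    else if PySem.Str.startswith i "sca" then pvNum i "sca" :: pvClsS xs else pvClsS xs
def pvClsO : List String → List String
  | [] => []
  | i :: xs =>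
    if PySem.Str.startswith i "chr" then pvClsO xs
    else if PySem.Str.startswith i "sca" then pvClsO xs else i :: pvClsO xs
def pvDecL : List String → List ((Int × Int) × String)
  | [] => []
  | i :: xs =>
    (if PySem.Str.startswith i "chr" then pvDec0 (pvNum i "chr")
     else if PySem.Str.startswith i "sca" then pvDec1 (pvNum i "sca")
     else pvDec2 i) :: pvDecL xs

-- generic insertBy facts specific to this bucketed situation
theorem pv_insertBy_append_right {α : Type} (before : α → α → Bool) (x : α)
    (l1 l2 : List α) (h : ∀ y ∈ l2, before x y = true) :
    PySem.List.insertBy before x (l1 ++ l2) = PySem.List.insertBy before x l1 ++ l2 := by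
  induction l1 with
  | nil =>
    cases l2 with
    | nil => rfl
    | cons b t => simp [PySem.List.insertBy, h b (by simp)]
  | cons a t ih =>
    by_cases hx : before x a = true
    · simp [PySem.List.insertBy, hx]
    · simp only [List.cons_append, PySem.List.insertBy, Bool.not_eq_true] at *
      simp [hx, ih]

theorem pv_insertBy_append_left {α : Type} (before : α → α → Bool) (x : α)
    (l1 l2 : List α) (h : ∀ y ∈ l1, before x y = false) :
    PySem.List.insertBy before x (l1 ++ l2) = l1 ++ PySem.List.insertBy before x l2 := by
  induction l1 with
  | nil => rfl
  | cons a t ih =>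
    simp only [List.cons_append, PySem.List.insertBy, h a (by simp)]
    simp only [Bool.false_eq_true, if_false, List.cons.injEq, true_and]
    exact ih (fun y hy => h y (by simp [hy]))

theorem pv_insertBy_map {α β : Type} (f : α → β) (bA : α → α → Bool) (bB : β → β → Bool)
    (h : ∀ a b, bB (f a) (f b) = bA a b) (x : α) (l : List α) :
    PySem.List.insertBy bB (f x) (l.map f) = (PySem.List.insertBy bA x l).map f := by
  induction l with
  | nil => rfl
  | cons a t ih =>
    simp only [List.map_cons, PySem.List.insertBy, h x a]
    by_cases hx : bA x a = true
    · simp [hx]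
    · simp only [Bool.not_eq_true] at hx
      simp [hx, ih]

-- the fold of A's classifying loop, under the precondition
theorem pv_foldA (xs : List String)
    (hp : ∀ i ∈ xs,
      (PySem.Str.startswith i "chr" = true → (pvIntSuffix i "chr").isSome = true) ∧
      (PySem.Str.startswith i "chr" = false → PySem.Str.startswith i "sca" = true →
        (pvIntSuffix i "sca").isSome = true)) :
    ∀ (c s : List Int) (o : List String),
      xs.foldl pvStepA (some (c, s, o)) =
        some (c ++ pvClsC xs, s ++ pvClsS xs, o ++ pvClsO xs) := by
  induction xs with
  | nil => intro c s o; simp [pvClsC, pvClsS, pvClsO]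
  | cons i t ih =>
    intro c s o
    have hpi := hp i (by simp)
    have hpt := fun j hj => hp j (List.mem_cons_of_mem _ hj)
    by_cases h1 : PySem.Str.startswith i "chr" = true
    · obtain ⟨n, hn⟩ := Option.isSome_iff_exists.mp (hpi.1 h1)
      have hnum : pvNum i "chr" = n := by simp [pvNum, hn]
      simp only [List.foldl_cons, pvStepA, Option.bind_some, h1, if_true, hn, Option.map_some,
        pvClsC, pvClsS, pvClsO, hnum, ih hpt]
      simp
    · simp only [Bool.not_eq_true] at h1
      by_cases h2 : PySem.Str.startswith i "sca" = true
      · obtain ⟨n, hn⟩ := Option.isSome_iff_exists.mp (hpi.2 h1 h2)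
        have hnum : pvNum i "sca" = n := by simp [pvNum, hn]
        simp only [List.foldl_cons, pvStepA, Option.bind_some, h1, Bool.false_eq_true, if_false,
          h2, if_true, hn, Option.map_some, pvClsC, pvClsS, pvClsO, hnum, ih hpt]
        simp
      · simp only [Bool.not_eq_true] at h2
        simp only [List.foldl_cons, pvStepA, Option.bind_some, h1, h2, Bool.false_eq_true,
          if_false, pvClsC, pvClsS, pvClsO, ih hpt]
        simp

-- the fold of B's decorating loop, under the precondition
theorem pv_foldB (xs : List String)
    (hp : ∀ i ∈ xs,
      (PySem.Str.startswith i "chr" = true → (pvIntSuffix i "chr").isSome = true) ∧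
      (PySem.Str.startswith i "chr" = false → PySem.Str.startswith i "sca" = true →
        (pvIntSuffix i "sca").isSome = true)) :
    ∀ (d : List ((Int × Int) × String)),
      xs.foldl pvStepB (some d) = some (d ++ pvDecL xs) := by
  induction xs with
  | nil => intro d; simp [pvDecL]
  | cons i t ih =>
    intro d
    have hpi := hp i (by simp)
    have hpt := fun j hj => hp j (List.mem_cons_of_mem _ hj)
    by_cases h1 : PySem.Str.startswith i "chr" = true
    · obtain ⟨n, hn⟩ := Option.isSome_iff_exists.mp (hpi.1 h1)
      have hnum : pvNum i "chr" = n := by simp [pvNum, hn]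
      simp only [List.foldl_cons, pvStepB, Option.bind_some, h1, if_true, hn, Option.map_some,
        pvDecL, hnum, pvDec0, ih hpt]
      simp
    · simp only [Bool.not_eq_true] at h1
      by_cases h2 : PySem.Str.startswith i "sca" = true
      · obtain ⟨n, hn⟩ := Option.isSome_iff_exists.mp (hpi.2 h1 h2)
        have hnum : pvNum i "sca" = n := by simp [pvNum, hn]
        simp only [List.foldl_cons, pvStepB, Option.bind_some, h1, Bool.false_eq_true, if_false,
          h2, if_true, hn, Option.map_some, pvDecL, hnum, pvDec1, ih hpt]
        simp
      · simp only [Bool.not_eq_true] at h2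
        simp only [List.foldl_cons, pvStepB, Option.bind_some, h1, h2, Bool.false_eq_true,
          if_false, pvDecL, pvDec2, ih hpt]
        simp

-- the core: one stable insertion pass over the decorated stream keeps the three buckets
-- contiguous, each internally insertion-sorted, 'other' in arrival order
theorem pv_core (xs : List String) :
    ∀ (a b : List Int) (C : List String),
      (pvDecL xs).foldl (fun acc t => PySem.List.insertBy pvLt2 t acc)
          ((pvIsort a).map pvDec0 ++ ((pvIsort b).map pvDec1 ++ C.map pvDec2))
        = (pvIsort (a ++ pvClsC xs)).map pvDec0 ++
            ((pvIsort (b ++ pvClsS xs)).map pvDec1 ++ (C ++ pvClsO xs).map pvDec2) := by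
  induction xs with
  | nil => intro a b C; simp [pvClsC, pvClsS, pvClsO, pvDecL]
  | cons i t ih =>
    intro a b C
    by_cases h1 : PySem.Str.startswith i "chr" = true
    · have step :
        PySem.List.insertBy pvLt2 (pvDec0 (pvNum i "chr"))
            ((pvIsort a).map pvDec0 ++ ((pvIsort b).map pvDec1 ++ C.map pvDec2))
          = (pvIsort (a ++ [pvNum i "chr"])).map pvDec0 ++
              ((pvIsort b).map pvDec1 ++ C.map pvDec2) := by
        rw [pv_insertBy_append_right pvLt2 _ _ _ (by
          intro y hy
          rcases List.mem_append.mp hy with hy | hy <;>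
            · obtain ⟨z, _, rfl⟩ := List.mem_map.mp hy
              simp [pvLt2, pvDec0, pvDec1, pvDec2])]
        rw [pv_insertBy_map pvDec0 pvLtI pvLt2 (by intro p q; simp [pvLt2, pvDec0, pvLtI]) _ _]
        have : pvIsort (a ++ [pvNum i "chr"]) =
            PySem.List.insertBy pvLtI (pvNum i "chr") (pvIsort a) := by
          simp [pvIsort, List.foldl_append]
        rw [this]
      simp only [pvDecL, h1, if_true, List.foldl_cons, step, ih,
        pvClsC, pvClsS, pvClsO]
      rw [show a ++ pvNum i "chr" :: pvClsC t = (a ++ [pvNum i "chr"]) ++ pvClsC t by simp]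
    · simp only [Bool.not_eq_true] at h1
      by_cases h2 : PySem.Str.startswith i "sca" = true
      · have step :
          PySem.List.insertBy pvLt2 (pvDec1 (pvNum i "sca"))
              ((pvIsort a).map pvDec0 ++ ((pvIsort b).map pvDec1 ++ C.map pvDec2))
            = (pvIsort a).map pvDec0 ++
                ((pvIsort (b ++ [pvNum i "sca"])).map pvDec1 ++ C.map pvDec2) := by
          rw [pv_insertBy_append_left pvLt2 _ _ _ (by
            intro y hy
            obtain ⟨z, _, rfl⟩ := List.mem_map.mp hy
            simp [pvLt2, pvDec0, pvDec1])]
          rw [pv_insertBy_append_right pvLt2 _ _ _ (by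
            intro y hy
            obtain ⟨z, _, rfl⟩ := List.mem_map.mp hy
            simp [pvLt2, pvDec1, pvDec2])]
          rw [pv_insertBy_map pvDec1 pvLtI pvLt2 (by intro p q; simp [pvLt2, pvDec1, pvLtI]) _ _]
          have : pvIsort (b ++ [pvNum i "sca"]) =
              PySem.List.insertBy pvLtI (pvNum i "sca") (pvIsort b) := by
            simp [pvIsort, List.foldl_append]
          rw [this]
        simp only [pvDecL, h1, Bool.false_eq_true, if_false, h2, if_true, List.foldl_cons,
          step, ih, pvClsC, pvClsS, pvClsO]
        rw [show b ++ pvNum i "sca" :: pvClsS t = (b ++ [pvNum i "sca"]) ++ pvClsS t by simp]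
      · simp only [Bool.not_eq_true] at h2
        have step :
          PySem.List.insertBy pvLt2 (pvDec2 i)
              ((pvIsort a).map pvDec0 ++ ((pvIsort b).map pvDec1 ++ C.map pvDec2))
            = (pvIsort a).map pvDec0 ++
                ((pvIsort b).map pvDec1 ++ (C ++ [i]).map pvDec2) := by
          rw [pv_insertBy_append_left pvLt2 _ _ _ (by
            intro y hy
            obtain ⟨z, _, rfl⟩ := List.mem_map.mp hy
            simp [pvLt2, pvDec0, pvDec2])]
          rw [pv_insertBy_append_left pvLt2 _ _ _ (by
            intro y hy
            obtain ⟨z, _, rfl⟩ := List.mem_map.mp hy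
            simp [pvLt2, pvDec1, pvDec2])]
          rw [PySem.List.insertBy_of_forall_not_before pvLt2 _ _ (by
            intro y hy
            obtain ⟨z, _, rfl⟩ := List.mem_map.mp hy
            simp [pvLt2, pvDec2])]
          simp
        simp only [pvDecL, h1, h2, Bool.false_eq_true, if_false, List.foldl_cons, step, ih,
          pvClsC, pvClsS, pvClsO]
        simp

-- ===== VERDICT (by name: the statement is the Claim_ definition above) =====
theorem sort_chr_spec : Claim_equal_sort_chr := by
  intro xs _ hpre
  unfold Spec_sort_chr sort_chr sort_chr_alt
  rw [show (some ([], [], []) : Option (List Int × List Int × List String)) =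
        some (([] : List Int), ([] : List Int), ([] : List String)) from rfl]
  rw [pv_foldA xs hpre, pv_foldB xs hpre]
  simp only [List.nil_append]
  have hs2 : PySem.List.sorted2 (pvDecL xs) (fun t => t.1.1) (fun t => t.1.2) false =
      (pvDecL xs).foldl (fun acc t => PySem.List.insertBy pvLt2 t acc) [] := rfl
  have hcore := pv_core xs [] [] []
  simp only [pvIsort, List.foldl_nil, List.map_nil, List.nil_append, List.append_nil] at hcore
  have hsortC : PySem.List.sorted (pvClsC xs) (fun x => x) false =
      pvIsort (pvClsC xs) := rfl
  have hsortS : PySem.List.sorted (pvClsS xs) (fun x => x) false =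
      pvIsort (pvClsS xs) := rfl
  rw [hs2, hcore, hsortC, hsortS]
  simp only [PySem.List.foldl_append_singleton_eq_map,
    List.map_append, List.map_map, List.nil_append]
  simp [pvIsort, pvDec0, pvDec1, pvDec2, Function.comp_def]
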